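-- pv_equiv track=rewrite | github.com/Sepulchre49/aoc-2023 | day3/solution.py | get_adjacent_number
-- ===== SOURCE A (Python) =====
-- def get_adjacent_number(matrix, point):
--     i, j = point
--     left = right = j
--     while left >0 and matrix[i][left-1].isnumeric():
--         left -= 1
--     while right < len(matrix[i])-1 and matrix[i][right+1].isnumeric():
--         right += 1
--
--     value = int(matrix[i][left:right+1])
--     return (value, left)
-- ===== SOURCE B (Python) =====
-- def get_adjacent_number(matrix, point):
--     # Idiomatic boundary computation: strip the digit run off each side with
--     # rstrip/lstrip instead of stepping character by character.
--     i, j = point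
--     row = matrix[i]
--     digits = "0123456789"
--     left = len(row[:j].rstrip(digits))
--     right = len(row) - len(row[j + 1:].lstrip(digits)) - 1
--     return (int(row[left:right + 1]), left)
-- ===== Notes on version B (the rewrite author's own statement) =====
-- stated objective: idiomatic
-- what changed: B computes the number's boundaries by slicing the row at j and stripping the digit run off each side with rstrip/lstrip instead of A's two character-stepping while loops.
-- outside the precondition, e.g. on get_adjacent_number(['12'], (0, -1)): A returns (2, -1), B returns (12, 0)
import Mathlib
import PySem

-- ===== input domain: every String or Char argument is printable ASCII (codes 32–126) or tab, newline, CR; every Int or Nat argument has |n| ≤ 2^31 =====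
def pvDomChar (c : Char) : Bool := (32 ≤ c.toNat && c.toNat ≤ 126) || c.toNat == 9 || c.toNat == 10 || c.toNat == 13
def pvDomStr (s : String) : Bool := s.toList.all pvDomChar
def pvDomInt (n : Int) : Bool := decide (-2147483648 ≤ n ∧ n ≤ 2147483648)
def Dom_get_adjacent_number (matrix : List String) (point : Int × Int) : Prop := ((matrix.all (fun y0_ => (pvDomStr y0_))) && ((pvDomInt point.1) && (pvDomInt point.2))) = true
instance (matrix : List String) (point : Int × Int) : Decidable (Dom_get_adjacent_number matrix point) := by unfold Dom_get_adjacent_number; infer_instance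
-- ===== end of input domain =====

-- B computes the number's boundaries idiomatically with rstrip/lstrip on slices instead of A's character-stepping while loops; equivalence on Pre_ (valid row, 0 ≤ j ≤ len, A's int() succeeds).


-- ===== PORT A =====
-- Python's str.isnumeric agrees with isdigit ('0'..'9') on the printable-ASCII domain; exact on Dom_.
def pvIsNum (c : Char) : Bool := PySem.Chars.isdigit c

-- while left > 0 and matrix[i][left-1].isnumeric(): left -= 1   (fuel = left.toNat suffices: each step needs left > 0 and decrements)
def pvLeftA (row : List Char) : Int → Nat → Int
  | left, 0 => left
  | left, f+1 =>
    if left > 0 ∧ pvIsNum (PySem.List.pyGetD row (left-1) ' ') = true then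
      pvLeftA row (left-1) f
    else left

-- while right < len(matrix[i])-1 and matrix[i][right+1].isnumeric(): right += 1   (fuel = (len-1-right).toNat: each step needs right < len-1 and increments)
def pvRightA (row : List Char) : Int → Nat → Int
  | right, 0 => right
  | right, f+1 =>
    if right < (row.length : Int) - 1 ∧ pvIsNum (PySem.List.pyGetD row (right+1) ' ') = true then
      pvRightA row (right+1) f
    else right

def get_adjacent_number (matrix : List String) (point : Int × Int) : Int × Int :=
  let i := point.1
  let j := point.2
  let row := ((PySem.List.pyGet? matrix i).getD "").toList
  let left := pvLeftA row j j.toNat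
  let right := pvRightA row j ((row.length : Int) - 1 - j).toNat
  ((PySem.Int.ofChars? (PySem.List.slice row (some left) (some (right + 1)))).getD 0, left)

-- ===== PORT B =====
-- hand ports of str.rstrip("0123456789") / str.lstrip("0123456789"): drop the chars of that set
-- from the right (resp. left) end; exact, since pvIsNum c ↔ c ∈ "0123456789"
def pvRstripDigits (cs : List Char) : List Char := ((cs.reverse.dropWhile pvIsNum).reverse)
def pvLstripDigits (cs : List Char) : List Char := cs.dropWhile pvIsNum

def get_adjacent_number_alt (matrix : List String) (point : Int × Int) : Int × Int :=
  let i := point.1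
  let j := point.2
  let row := ((PySem.List.pyGet? matrix i).getD "").toList
  let left : Int := ((pvRstripDigits (PySem.List.slice row none (some j))).length : Int)
  let right : Int := (row.length : Int) - ((pvLstripDigits (PySem.List.slice row (some (j+1)) none)).length : Int) - 1
  ((PySem.Int.ofChars? (PySem.List.slice row (some left) (some (right + 1)))).getD 0, left)

-- ===== PRECONDITION & SPEC =====
-- Pre_ = "A returns normally": a valid (possibly negative) row index, 0 ≤ j ≤ len(row) (beyond that A
-- raises IndexError), and the digit-extended window around position j parses as a Python int (else A's
-- int() raises ValueError). Pre_ excludes negative j, where A's value comes from accidental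
-- negative-index wraparound of its expansion loops and B returns the number it finds by slicing instead.
def Pre_get_adjacent_number (matrix : List String) (point : Int × Int) : Prop :=
  PySem.Raise.InRange matrix.length point.1 ∧
  0 ≤ point.2 ∧
  point.2 ≤ ((((PySem.List.pyGet? matrix point.1).getD "").toList.length : Int)) ∧
  PySem.Int.ofChars?
    ((((((PySem.List.pyGet? matrix point.1).getD "").toList.take point.2.toNat).reverse.takeWhile pvIsNum).reverse)
      ++ ((((PySem.List.pyGet? matrix point.1).getD "").toList.drop point.2.toNat).take 1)
      ++ ((((PySem.List.pyGet? matrix point.1).getD "").toList.drop (point.2.toNat + 1)).takeWhile pvIsNum)) ≠ none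
instance (matrix : List String) (point : Int × Int) : Decidable (Pre_get_adjacent_number matrix point) := by
  unfold Pre_get_adjacent_number; infer_instance

def pvWitness_get_adjacent_number : List String × (Int × Int) := (["a12b"], (0, 2))

def Spec_get_adjacent_number (matrix : List String) (point : Int × Int) (out : Int × Int) : Prop := out = get_adjacent_number_alt matrix point
instance (matrix : List String) (point : Int × Int) (out : Int × Int) : Decidable (Spec_get_adjacent_number matrix point out) := by unfold Spec_get_adjacent_number; infer_instance

-- ===== CLAIM (what is proved, stated in full; the proofs are below) =====
def Claim_equal_get_adjacent_number : Prop := ∀ (matrix : List String) (point : Int × Int), Dom_get_adjacent_number matrix point → Pre_get_adjacent_number matrix point → Spec_get_adjacent_number matrix point (get_adjacent_number matrix point)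

-- ===== LEMMAS AND PROOFS =====

lemma pv_length_dropWhile (p : Char → Bool) (xs : List Char) :
    (xs.dropWhile p).length = xs.length - (xs.takeWhile p).length := by
  have h := congrArg List.length (List.takeWhile_append_dropWhile (p := p) (l := xs))
  rw [List.length_append] at h
  omega

lemma pv_takeWhile_le (p : Char → Bool) (xs : List Char) :
    (xs.takeWhile p).length ≤ xs.length := by
  have h := congrArg List.length (List.takeWhile_append_dropWhile (p := p) (l := xs))
  rw [List.length_append] at h
  omega

-- A's left loop lands exactly at j minus the trailing digit run of row[:j]
lemma pvLeftA_eq (row : List Char) : ∀ (l : Nat), l ≤ row.length →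
    pvLeftA row (l : Int) l = ((l - ((row.take l).reverse.takeWhile pvIsNum).length : Nat) : Int) := by
  intro l
  induction l with
  | zero => intro _; simp [pvLeftA]
  | succ l ih =>
    intro hl
    have hllt : l < row.length := by omega
    have hunf : pvLeftA row ((l+1 : Nat) : Int) (l+1) =
        if ((l+1 : Nat) : Int) > 0 ∧ pvIsNum (PySem.List.pyGetD row (((l+1 : Nat) : Int) - 1) ' ') = true then
          pvLeftA row (((l+1 : Nat) : Int) - 1) l
        else ((l+1 : Nat) : Int) := rfl
    have hidx : (((l+1 : Nat) : Int) - 1) = (l : Int) := by push_cast; ring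
    have htake : (row.take (l+1)).reverse = row[l] :: (row.take l).reverse := by
      rw [List.take_add_one]
      simp [List.getElem?_eq_getElem hllt]
    by_cases hd : pvIsNum row[l] = true
    · rw [hunf, if_pos, hidx, ih (by omega), htake]
      · rw [List.takeWhile_cons_of_pos hd]
        simp
      · refine ⟨by positivity, ?_⟩
        rw [hidx, PySem.List.pyGetD_natCast, List.getD_eq_getElem _ _ hllt]
        exact hd
    · rw [hunf, if_neg, htake, List.takeWhile_cons_of_neg (by simp [hd])]
      · simp
      · rintro ⟨-, hc⟩
        rw [hidx, PySem.List.pyGetD_natCast, List.getD_eq_getElem _ _ hllt] at hc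
        exact hd hc

-- A's right loop lands exactly at j plus the leading digit run of row[j+1:]
lemma pvRightA_eq (row : List Char) : ∀ (fuel r : Nat), r ≤ row.length → row.length - 1 - r = fuel →
    pvRightA row (r : Int) fuel = ((r + ((row.drop (r+1)).takeWhile pvIsNum).length : Nat) : Int) := by
  intro fuel
  induction fuel with
  | zero =>
    intro r hr hf
    have hnil : row.drop (r+1) = [] := List.drop_eq_nil_of_le (by omega)
    simp [pvRightA, hnil]
  | succ f ih =>
    intro r hr hf
    have hrlt : r + 1 < row.length := by omega
    have hunf : pvRightA row (r : Int) (f+1) =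
        if (r : Int) < (row.length : Int) - 1 ∧ pvIsNum (PySem.List.pyGetD row ((r : Int) + 1) ' ') = true then
          pvRightA row ((r : Int) + 1) f
        else (r : Int) := rfl
    have hidx : ((r : Int) + 1) = ((r + 1 : Nat) : Int) := by push_cast; ring
    have hdrop : row.drop (r+1) = row[r+1] :: row.drop (r+2) := List.drop_eq_getElem_cons hrlt
    by_cases hd : pvIsNum row[r+1] = true
    · rw [hunf, if_pos, hidx, ih (r+1) (by omega) (by omega), hdrop]
      · rw [List.takeWhile_cons_of_pos hd, show r+1+1 = r+2 by omega]
        simp only [List.length_cons]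
        push_cast
        omega
      · refine ⟨by omega, ?_⟩
        rw [hidx, PySem.List.pyGetD_natCast, List.getD_eq_getElem _ _ hrlt]
        exact hd
    · rw [hunf, if_neg, hdrop, List.takeWhile_cons_of_neg (by simp [hd])]
      · simp
      · rintro ⟨-, hc⟩
        rw [hidx, PySem.List.pyGetD_natCast, List.getD_eq_getElem _ _ hrlt] at hc
        exact hd hc

-- ===== VERDICT (by name: the statement is the Claim_ definition above) =====
theorem get_adjacent_number_spec : Claim_equal_get_adjacent_number := by
  unfold Claim_equal_get_adjacent_number Spec_get_adjacent_number
  intro matrix point _hdom hpre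
  obtain ⟨hin, hj0, hjle, _hparse⟩ := hpre
  set j := point.2 with hj
  set row := ((PySem.List.pyGet? matrix point.1).getD "").toList with hrow
  set jn := j.toNat with hjn
  have hjcast : j = (jn : Int) := by omega
  have hjnle : jn ≤ row.length := by omega
  set t := ((row.take jn).reverse.takeWhile pvIsNum).length with ht
  set d := ((row.drop (jn+1)).takeWhile pvIsNum).length with hd
  have htle : t ≤ jn := by
    have h1 := pv_takeWhile_le pvIsNum (row.take jn).reverse
    simp at h1
    omega
  -- A's two loop results
  have hA_left : pvLeftA row j j.toNat = ((jn - t : Nat) : Int) := by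
    rw [hjcast]; rw [show ((jn : Int)).toNat = jn by omega]
    exact pvLeftA_eq row jn hjnle
  have hA_right : pvRightA row j ((row.length : Int) - 1 - j).toNat = ((jn + d : Nat) : Int) := by
    rw [hjcast]
    have hfuel : ((row.length : Int) - 1 - (jn : Int)).toNat = row.length - 1 - jn := by omega
    rw [hfuel]
    exact pvRightA_eq row (row.length - 1 - jn) jn hjnle rfl
  -- B's two boundary computations
  have hB_take : PySem.List.slice row none (some j) = row.take jn := by
    rw [PySem.List.slice_to row hj0]
  have hB_left : ((pvRstripDigits (PySem.List.slice row none (some j))).length : Int) = ((jn - t : Nat) : Int) := by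
    rw [hB_take]
    unfold pvRstripDigits
    rw [List.length_reverse, pv_length_dropWhile]
    congr 1
    simp
    omega
  have hB_drop : PySem.List.slice row (some (j+1)) none = row.drop (jn+1) := by
    rw [PySem.List.slice_from row (by omega)]
    congr 1
    omega
  have hB_lstrip : ((pvLstripDigits (PySem.List.slice row (some (j+1)) none)).length : Int) =
      ((row.length - (jn+1) - d : Nat) : Int) := by
    rw [hB_drop]
    unfold pvLstripDigits
    rw [pv_length_dropWhile]
    simp
    rw [← hd]
  -- assemble both sides
  show ((PySem.Int.ofChars? (PySem.List.slice row (some (pvLeftA row j j.toNat))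
          (some (pvRightA row j ((row.length : Int) - 1 - j).toNat + 1)))).getD 0,
        pvLeftA row j j.toNat) =
       ((PySem.Int.ofChars? (PySem.List.slice row
          (some ((pvRstripDigits (PySem.List.slice row none (some j))).length : Int))
          (some ((row.length : Int) - ((pvLstripDigits (PySem.List.slice row (some (j+1)) none)).length : Int) - 1 + 1)))).getD 0,
        ((pvRstripDigits (PySem.List.slice row none (some j))).length : Int))
  rw [hA_left, hA_right, hB_left, hB_lstrip]
  clear_value j row jn t d
  have hslices : PySem.List.slice row (some ((jn - t : Nat) : Int)) (some (((jn + d : Nat) : Int) + 1)) =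
      PySem.List.slice row (some ((jn - t : Nat) : Int))
        (some ((row.length : Int) - ((row.length - (jn+1) - d : Nat) : Int) - 1 + 1)) := by
    rcases Nat.lt_or_ge jn row.length with hlt | hge
    · -- j strictly inside the row: the two upper bounds are the same integer
      have hdle : d ≤ row.length - (jn+1) := by
        have h := pv_takeWhile_le pvIsNum (row.drop (jn+1))
        rw [List.length_drop, ← hd] at h
        exact h
      have heq : (((jn + d : Nat) : Int) + 1) =
          ((row.length : Int) - ((row.length - (jn+1) - d : Nat) : Int) - 1 + 1) := by omega
      rw [heq]
    · -- j = len(row): bounds len+1 (A) and len (B); both slices clamp to row[jn-t:]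
      have hjeq : jn = row.length := by omega
      have hd0 : d = 0 := by
        rw [hd, List.drop_eq_nil_of_le (by omega)]
        simp
      have h1 : (((jn + d : Nat) : Int) + 1) = ((jn + d + 1 : Nat) : Int) := by push_cast; ring
      have h2 : ((row.length : Int) - ((row.length - (jn+1) - d : Nat) : Int) - 1 + 1) = ((row.length : Int)) := by omega
      rw [h1, h2, PySem.List.slice_natCast, show ((row.length : Int)) = ((row.length : Nat) : Int) from rfl, PySem.List.slice_natCast]
      have hlen : (row.drop (jn - t)).length = row.length - (jn - t) := List.length_drop
      have e3 : List.take (jn + d + 1 - (jn - t)) (row.drop (jn - t)) = row.drop (jn - t) :=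
        List.take_of_length_le (by omega)
      have e4 : List.take (row.length - (jn - t)) (row.drop (jn - t)) = row.drop (jn - t) :=
        List.take_of_length_le (by omega)
      rw [e3, e4]
  rw [hslices]
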